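-- pv_equiv track=rewrite | github.com/miche715/algorithm-practice | python/p_389478.py | solution
-- ===== SOURCE A (Python) =====
-- def solution(n, w, num):
--     answer = 0
--     box = [
--         ([i * w + j + 1 if i * w + j + 1 <= n else -1 for j in range(w)][::-1]
--         if i % 2 == 1
--         else
--         [i * w + j + 1 if i * w + j + 1 <= n else -1 for j in range(w)])
--         for i in range((n + w - 1) // w)
--     ]
--     target_x = -1
--
--     for y in box:
--         for i, x in enumerate(y):
--             if x == num:
--                 target_x = i
--             if target_x == i and x > -1:
--                 answer = answer + 1
--
--     return answer
-- ===== SOURCE B (Python) =====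
-- def solution(n, w, num):
--     if w <= 0 or num < 1 or num > n:
--         return 0
--     r, j = divmod(num - 1, w)
--     col = j if r % 2 == 0 else w - 1 - j
--     last = (n + w - 1) // w - 1
--     jl = col if last % 2 == 0 else w - 1 - col
--     return (last - r) + (1 if last * w + jl + 1 <= n else 0)
-- ===== Notes on version B (the rewrite author's own statement) =====
-- stated objective: faster
-- what changed: B replaces A's construction of the whole boustrophedon grid and its full double-loop scan by O(1) arithmetic: divmod locates num's row and display column, and a ceiling-division row count plus one last-row validity test give the answer.
import Mathlib
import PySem

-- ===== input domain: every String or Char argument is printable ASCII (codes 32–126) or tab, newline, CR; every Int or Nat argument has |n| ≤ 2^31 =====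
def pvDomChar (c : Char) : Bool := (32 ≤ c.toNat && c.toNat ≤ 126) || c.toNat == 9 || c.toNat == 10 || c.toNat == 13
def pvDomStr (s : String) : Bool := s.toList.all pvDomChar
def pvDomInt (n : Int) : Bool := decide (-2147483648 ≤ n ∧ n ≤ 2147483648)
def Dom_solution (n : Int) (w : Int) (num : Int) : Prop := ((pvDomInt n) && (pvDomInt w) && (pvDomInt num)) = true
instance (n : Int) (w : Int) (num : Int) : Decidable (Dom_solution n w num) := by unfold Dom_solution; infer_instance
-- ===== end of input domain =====

-- B replaces A's O(n)-size boustrophedon grid and scan by O(1) arithmetic on row/column indices.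

-- ===== PORT A =====
-- inner-loop body: `if x == num: target_x = i` then `if target_x == i and x > -1: answer += 1`
def aStep (num : Int) (s : Int × Int) (p : Int × Int) : Int × Int :=
  let target_x := if p.2 = num then p.1 else s.2
  let answer := if target_x = p.1 ∧ p.2 > -1 then s.1 + 1 else s.1
  (answer, target_x)

-- one row of `box`: the comprehension, reversed when i % 2 == 1 ([::-1] is reverse: PySem.List.slice?_none_none_neg_one)
def aRow (n w i : Int) : List Int :=
  let base := (PySem.List.pyRange 0 w 1).map (fun j => if i * w + j + 1 ≤ n then i * w + j + 1 else -1)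
  if PySem.Int.mod i 2 = 1 then base.reverse else base

-- `for i, x in enumerate(y)`: fold over y carrying enumerate's counter i alongside the state
def solution (n : Int) (w : Int) (num : Int) : Int :=
  let box := (PySem.List.pyRange 0 (PySem.Int.floordiv (n + w - 1) w) 1).map (aRow n w)
  (box.foldl (fun s y =>
    (y.foldl (fun (p : (Int × Int) × Int) x => (aStep num p.1 (p.2, x), p.2 + 1)) (s, 0)).1)
    (0, -1)).1

-- ===== PORT B =====
def solution_alt (n : Int) (w : Int) (num : Int) : Int :=
  if w ≤ 0 ∨ num < 1 ∨ n < num then 0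
  else
    let r := PySem.Int.floordiv (num - 1) w
    let j := PySem.Int.mod (num - 1) w
    let col := if PySem.Int.mod r 2 = 0 then j else w - 1 - j
    let last := PySem.Int.floordiv (n + w - 1) w - 1
    let jl := if PySem.Int.mod last 2 = 0 then col else w - 1 - col
    (last - r) + (if last * w + jl + 1 ≤ n then 1 else 0)

-- ===== PRECONDITION & SPEC =====
-- Python A raises ZeroDivisionError exactly when w = 0 (the `// w`); excluded, nothing else.
def Pre_solution (n : Int) (w : Int) (num : Int) : Prop := w ≠ 0
instance (n : Int) (w : Int) (num : Int) : Decidable (Pre_solution n w num) := by unfold Pre_solution; infer_instance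
def pvWitness_solution : Int × Int × Int := (10, 3, 5)

def Spec_solution (n : Int) (w : Int) (num : Int) (out : Int) : Prop := out = solution_alt n w num
instance (n : Int) (w : Int) (num : Int) (out : Int) : Decidable (Spec_solution n w num out) := by unfold Spec_solution; infer_instance

-- ===== CLAIM =====
def Claim_equal_solution : Prop := ∀ (n : Int) (w : Int) (num : Int), Dom_solution n w num → Pre_solution n w num → Spec_solution n w num (solution n w num)

-- ===== LEMMAS AND PROOFS =====

-- the value placed at original column j of row i (before any reversal)
def fcell (n w i j : Int) : Int := if i * w + j + 1 ≤ n then i * w + j + 1 else -1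

-- one full row of A's double loop, as a function of the row index
def aInner (num : Int) (p : (Int × Int) × Int) (x : Int) : (Int × Int) × Int :=
  (aStep num p.1 (p.2, x), p.2 + 1)

def rowFold (n w num : Int) (s : Int × Int) (i : Int) : Int × Int :=
  ((aRow n w i).foldl (aInner num) (s, 0)).1

-- how many cells the inner loop counts in a row it does not find num in:
-- 1 exactly when the carried target_x points at a valid (> -1) cell
def cnt (k t : Int) : List Int → Int
  | [] => 0
  | x :: xs => (if t = k ∧ x > -1 then 1 else 0) + cnt (k + 1) t xs

theorem solution_eq_rowFold (n w num : Int) :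
    solution n w num =
      ((PySem.List.pyRange 0 (PySem.Int.floordiv (n + w - 1) w) 1).foldl
        (rowFold n w num) (0, -1)).1 := by
  simp only [solution, List.foldl_map]
  rfl


theorem cnt_neg (y : List Int) : ∀ k t : Int, t < k → cnt k t y = 0 := by
  induction y with
  | nil => intro k t _; rfl
  | cons x xs ih =>
      intro k t h
      simp only [cnt]
      rw [if_neg (by omega), ih (k + 1) t (by omega)]
      ring

theorem cnt_eval (y : List Int) : ∀ k t : Int, k ≤ t → t - k < y.length →
    cnt k t y = if y.getD (t - k).toNat (-1) > -1 then 1 else 0 := by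
  induction y with
  | nil => intro k t h1 h2; simp at h2; omega
  | cons x xs ih =>
      intro k t h1 h2
      simp only [cnt]
      by_cases ht : t = k
      · rw [cnt_neg xs (k + 1) t (by omega)]
        have h0 : (t - k).toNat = 0 := by omega
        simp [ht]
      · rw [if_neg (by omega), ih (k + 1) t (by omega)
            (by simp at h2 ⊢; omega)]
        have : (t - k).toNat = (t - (k + 1)).toNat + 1 := by omega
        simp [this]

-- L0: if num < 0 the counter can never fire (a cell equal to num is never > -1)
theorem inner_neg (num : Int) (hnum : num ≤ -1) (y : List Int) :
    ∀ k a t : Int, t < k →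
      ((y.foldl (aInner num) ((a, t), k)).1).1 = a := by
  induction y with
  | nil => intro k a t _; rfl
  | cons x xs ih =>
      intro k a t h
      simp only [List.foldl_cons, aInner, aStep]
      by_cases hx : x = num
      · simp only [hx]
        rw [if_neg (by simp; omega)]
        exact ih (k + 1) a k (by omega)
      · simp only [if_neg hx]
        rw [if_neg (by simp; omega)]
        exact ih (k + 1) a t (by omega)

-- L1: a row not containing num leaves target_x alone and adds cnt
theorem inner_skip (num : Int) (y : List Int) (hy : num ∉ y) :
    ∀ k a t : Int,
      y.foldl (aInner num) ((a, t), k) = ((a + cnt k t y, t), k + y.length) := by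
  induction y with
  | nil => intro k a t; simp [cnt]
  | cons x xs ih =>
      intro k a t
      have hx : x ≠ num := fun h => hy (h ▸ List.mem_cons_self)
      have hxs : num ∉ xs := fun h => hy (List.mem_cons_of_mem _ h)
      simp only [List.foldl_cons, aInner, aStep, if_neg hx]
      rw [ih hxs (k + 1)]
      simp only [cnt]
      by_cases hc : t = k ∧ x > -1
      · rw [if_pos hc, if_pos hc]
        simp only [Prod.mk.injEq]
        refine ⟨⟨by ring, by trivial⟩, by simp; ring⟩
      · rw [if_neg hc, if_neg hc]
        simp only [Prod.mk.injEq]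
        refine ⟨⟨by ring, by trivial⟩, by simp; ring⟩

-- L2: the row containing num (exactly at display position p) counts 1 and sets target_x
theorem inner_hit (num : Int) (hnum : 0 ≤ num) (y : List Int) :
    ∀ (p : Nat) (k a t : Int), t < k → (hp : p < y.length) →
      (∀ m (hm : m < y.length), y[m] = num ↔ m = p) →
      y.foldl (aInner num) ((a, t), k) = ((a + 1, k + p), k + y.length) := by
  induction y with
  | nil => intro p k a t _ hp _; simp at hp
  | cons x xs ih =>
      intro p k a t ht hp hiff
      simp only [List.foldl_cons, aInner, aStep]
      cases p with
      | zero =>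
          have hx : x = num := by
            have := (hiff 0 (by simp)); simpa using this
          have hxs : num ∉ xs := by
            intro hmem
            obtain ⟨m, hm, hval⟩ := List.getElem_of_mem hmem
            have := (hiff (m + 1) (by simpa using Nat.succ_lt_succ hm)).mp (by simpa using hval)
            omega
          simp only [hx, ite_true, true_and]
          rw [if_pos (show num > -1 by omega)]
          rw [inner_skip num xs hxs (k + 1)]
          rw [cnt_neg xs (k + 1) k (by omega)]
          simp only [Prod.mk.injEq]
          refine ⟨⟨by ring, by simp⟩, by simp; ring⟩
      | succ p' =>
          have hx : x ≠ num := by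
            intro h
            have := (hiff 0 (by simp)).mp (by simpa using h)
            omega
          simp only [if_neg hx]
          rw [if_neg (by simp; omega)]
          have := ih p' (k + 1) a t (by omega) (by simpa using Nat.lt_of_succ_lt_succ hp)
            (fun m hm => by
              have := hiff (m + 1) (by simpa using Nat.succ_lt_succ hm)
              simpa using this)
          rw [this]
          simp only [Prod.mk.injEq]
          refine ⟨⟨by trivial, by push_cast; ring⟩, by simp; ring⟩

-- row description lemmas
theorem aRow_base (n w i : Int) :
    aRow n w i = if PySem.Int.mod i 2 = 1
      then ((PySem.List.pyRange 0 w 1).map (fcell n w i)).reverse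
      else (PySem.List.pyRange 0 w 1).map (fcell n w i) := rfl

theorem aRow_length (n w i : Int) : (aRow n w i).length = w.toNat := by
  rw [aRow_base]
  split <;> simp [PySem.List.length_pyRange_one]

theorem aRow_not_mem (n w i num : Int)
    (h : ∀ j : Int, 0 ≤ j → j < w → fcell n w i j ≠ num) : num ∉ aRow n w i := by
  have hbase : num ∉ (PySem.List.pyRange 0 w 1).map (fcell n w i) := by
    intro hm
    obtain ⟨j, hj, hval⟩ := List.mem_map.mp hm
    rw [PySem.List.mem_pyRange_one] at hj
    exact h j hj.1 hj.2 hval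
  rw [aRow_base]
  split
  · simpa using hbase
  · exact hbase

theorem aRow_getElem (n w i : Int) (m : Nat) (hm : m < (aRow n w i).length) :
    (aRow n w i)[m] = fcell n w i (if PySem.Int.mod i 2 = 1 then w - 1 - (m : Int) else (m : Int)) := by
  have hmw : m < w.toNat := by rw [aRow_length] at hm; exact hm
  by_cases hpar : PySem.Int.mod i 2 = 1
  · have he : aRow n w i = ((PySem.List.pyRange 0 w 1).map (fcell n w i)).reverse := by
      rw [aRow_base, if_pos hpar]
    rw [List.getElem_of_eq he hm, List.getElem_reverse, List.getElem_map,
        PySem.List.getElem_pyRange_one, if_pos hpar]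
    congr 1
    simp only [List.length_map, PySem.List.length_pyRange_one]
    omega
  · have he : aRow n w i = (PySem.List.pyRange 0 w 1).map (fcell n w i) := by
      rw [aRow_base, if_neg hpar]
    rw [List.getElem_of_eq he hm, List.getElem_map,
        PySem.List.getElem_pyRange_one, if_neg hpar]
    congr 1
    omega

-- per-row corollaries of the inner-loop lemmas
theorem rowFold_skip (n w num i : Int) (h : num ∉ aRow n w i) (a : Int) :
    rowFold n w num (a, -1) i = (a, -1) := by
  unfold rowFold
  rw [inner_skip num _ h 0, cnt_neg _ 0 (-1) (by omega)]
  norm_num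

theorem rowFold_after (n w num i c : Int) (h : num ∉ aRow n w i)
    (hc0 : 0 ≤ c) (hcw : c < w) (a : Int) :
    rowFold n w num (a, c) i =
      (a + (if (aRow n w i).getD c.toNat (-1) > -1 then 1 else 0), c) := by
  unfold rowFold
  rw [inner_skip num _ h 0, cnt_eval _ 0 c hc0 (by rw [aRow_length]; omega)]
  norm_num

-- segment lemmas for the outer loop
theorem foldl_skip (n w num : Int) (l : List Int) :
    ∀ (a : Int), (∀ i ∈ l, num ∉ aRow n w i) →
      l.foldl (rowFold n w num) (a, -1) = (a, -1) := by
  induction l with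
  | nil => intro a _; rfl
  | cons i l ih =>
      intro a h
      rw [List.foldl_cons, rowFold_skip n w num i (h i List.mem_cons_self) a]
      exact ih a (fun j hj => h j (List.mem_cons_of_mem _ hj))

theorem foldl_full (n w num c : Int) (l : List Int) :
    ∀ (a : Int), (∀ i ∈ l, ∀ b : Int, rowFold n w num (b, c) i = (b + 1, c)) →
      l.foldl (rowFold n w num) (a, c) = (a + l.length, c) := by
  induction l with
  | nil => intro a _; simp
  | cons i l ih =>
      intro a h
      rw [List.foldl_cons, h i List.mem_cons_self a,
          ih (a + 1) (fun j hj => h j (List.mem_cons_of_mem _ hj))]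
      simp
      ring

theorem foldl_nop (n w num : Int) (hw : w < 0) (l : List Int) (s : Int × Int) :
    l.foldl (rowFold n w num) s = s := by
  have hrow : ∀ i : Int, aRow n w i = [] := by
    intro i
    rw [aRow_base, PySem.List.pyRange_one_eq_nil (by omega)]
    split <;> rfl
  induction l with
  | nil => rfl
  | cons i l ih => rw [List.foldl_cons]; simp only [rowFold, hrow i, List.foldl_nil]; exact ih

-- the value sitting under the carried column c in row i
theorem aRow_getD_col (n w i c : Int) (hw : 0 < w) (hc0 : 0 ≤ c) (hcw : c < w) :
    (aRow n w i).getD c.toNat (-1) =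
      fcell n w i (if PySem.Int.mod i 2 = 1 then w - 1 - c else c) := by
  rw [List.getD_eq_getElem _ _ (by rw [aRow_length]; omega), aRow_getElem]
  congr 1
  split <;> omega

theorem solution_spec' : ∀ (n w num : Int), w ≠ 0 → solution n w num = solution_alt n w num := by
  intro n w num hpre
  rw [solution_eq_rowFold]
  rcases lt_or_gt_of_ne hpre with hw | hw
  · -- w < 0 : every row is empty, nothing is counted
    rw [foldl_nop n w num hw]
    simp only [solution_alt]
    rw [if_pos (Or.inl (by omega))]
  · -- w > 0
    set R := PySem.Int.floordiv (n + w - 1) w with hR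
    set M := PySem.Int.mod (n + w - 1) w with hM
    have hRM : R * w + M = n + w - 1 := PySem.Int.floordiv_mul_add_mod _ _
    have hM0 : 0 ≤ M := PySem.Int.mod_nonneg _ hw
    have hMw : M < w := PySem.Int.mod_lt _ hw
    by_cases hneg : num ≤ -1
    · -- num < 0 : the counter can never fire
      have hB : solution_alt n w num = 0 := by
        simp only [solution_alt]; rw [if_pos (Or.inr (Or.inl (by omega)))]
      rw [hB]
      by_cases hRpos : R ≤ 0
      · rw [PySem.List.pyRange_one_eq_nil hRpos]; rfl
      · rw [PySem.List.pyRange_one_append 0 (R - 1) R (by omega) (by omega),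
            List.foldl_append,
            PySem.List.pyRange_one_cons (show R - 1 < R by omega),
            PySem.List.pyRange_one_eq_nil (show R ≤ R - 1 + 1 by omega)]
        rw [foldl_skip n w num _ 0 ?_]
        · simp only [List.foldl_cons, List.foldl_nil]
          exact inner_neg num hneg _ 0 0 (-1) (by omega)
        · intro i hi
          rw [PySem.List.mem_pyRange_one] at hi
          apply aRow_not_mem
          intro j hj0 hjw
          unfold fcell
          have h1 : (i + 1) * w ≤ (R - 1) * w :=
            mul_le_mul_of_nonneg_right (by omega) (by omega)
          have h2 : (i + 1) * w = i * w + w := by ring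
          have h3 : (R - 1) * w = R * w - w := by ring
          have h0 : 0 ≤ i * w := mul_nonneg (by omega) (by omega)
          rw [if_pos (by omega)]
          omega
    · -- num ≥ 0
      by_cases hin : 1 ≤ num ∧ num ≤ n
      · -- the main case : num is in the grid
        set q := PySem.Int.floordiv (num - 1) w with hq
        set j := PySem.Int.mod (num - 1) w with hj
        have hqj : q * w + j = num - 1 := PySem.Int.floordiv_mul_add_mod _ _
        have hj0 : 0 ≤ j := PySem.Int.mod_nonneg _ hw
        have hjw : j < w := PySem.Int.mod_lt _ hw
        have hq0 : 0 ≤ q := by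
          by_contra hcon
          have : q * w ≤ (-1) * w := mul_le_mul_of_nonneg_right (by omega) (by omega)
          omega
        have hqR : q < R := by
          have : q * w < R * w := by omega
          exact lt_of_mul_lt_mul_right this (by omega)
        set c : Int := if PySem.Int.mod q 2 = 0 then j else w - 1 - j with hc
        have hc0 : 0 ≤ c := by rw [hc]; split <;> omega
        have hcw : c < w := by rw [hc]; split <;> omega
        have hnotmem : ∀ i : Int, 0 ≤ i → i ≠ q → num ∉ aRow n w i := by
          intro i hi0 hiq
          apply aRow_not_mem
          intro j' hj'0 hj'w
          unfold fcell
          split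
          · -- a live cell i*w+j'+1 : equals num only in row q
            intro hval
            have : i = q := by
              rcases lt_or_gt_of_ne hiq with hlt | hgt
              · have h1 : (i + 1) * w ≤ q * w :=
                  mul_le_mul_of_nonneg_right (by omega) (by omega)
                have h2 : (i + 1) * w = i * w + w := by ring
                omega
              · have h1 : (q + 1) * w ≤ i * w :=
                  mul_le_mul_of_nonneg_right (by omega) (by omega)
                have h2 : (q + 1) * w = q * w + w := by ring
                omega
            exact hiq this
          · omega
        have hhit : rowFold n w num (0, -1) q = (1, c) := by
          unfold rowFold
          have hlen : c.toNat < (aRow n w q).length := by rw [aRow_length]; omega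
          rw [inner_hit num (by omega) _ c.toNat 0 0 (-1) (by omega) hlen ?_]
          · simp only [Prod.mk.injEq]
            refine ⟨by norm_num, by omega⟩
          · intro m hm
            rw [aRow_getElem n w q m hm]
            rw [aRow_length] at hm
            unfold fcell
            have hmi : (m : Int) < w := by omega
            rcases PySem.Int.mod_two_eq q with hpar | hpar <;>
              rw [hc] <;> simp only [hpar] <;> norm_num <;> split_ifs <;> omega
        -- split the outer loop at row q
        rw [PySem.List.pyRange_one_append 0 q R (by omega) (by omega), List.foldl_append,
            PySem.List.pyRange_one_cons hqR, List.foldl_cons]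
        rw [foldl_skip n w num _ 0
            (fun i hi => by
              rw [PySem.List.mem_pyRange_one] at hi
              exact hnotmem i hi.1 (by omega))]
        rw [hhit]
        -- rows after q : one count per full row, maybe one in the last
        have hafter : ∀ i : Int, q < i → i ≤ R - 2 → ∀ b : Int,
            rowFold n w num (b, c) i = (b + 1, c) := by
          intro i hi1 hi2 b
          rw [rowFold_after n w num i c (hnotmem i (by omega) (by omega)) hc0 hcw b,
              aRow_getD_col n w i c hw hc0 hcw]
          unfold fcell
          have h1 : (i + 1) * w ≤ (R - 1) * w :=
            mul_le_mul_of_nonneg_right (by omega) (by omega)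
          have h2 : (i + 1) * w = i * w + w := by ring
          have h3 : (R - 1) * w = R * w - w := by ring
          have h0 : 0 ≤ i * w := mul_nonneg (by omega) (by omega)
          have hcell : ∀ jj : Int, 0 ≤ jj → jj < w → (if i * w + jj + 1 ≤ n then i * w + jj + 1 else -1) > -1 := by
            intro jj hjj0 hjjw
            rw [if_pos (by omega)]
            omega
          rw [if_pos (by split <;> [exact hcell _ (by omega) (by omega); exact hcell _ (by omega) (by omega)])]
        have hBmain : solution_alt n w num =
            (R - 1 - q) +
              (if (R - 1) * w + (if PySem.Int.mod (R - 1) 2 = 0 then c else w - 1 - c) + 1 ≤ n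
               then 1 else 0) := by
          simp only [solution_alt]
          rw [if_neg (by omega)]
        by_cases hlast : q = R - 1
        · -- num sits in the last row : nothing after it
          rw [PySem.List.pyRange_one_eq_nil (show R ≤ q + 1 by omega), List.foldl_nil]
          rw [hBmain, ← hlast]
          have hcj : (if PySem.Int.mod q 2 = 0 then c else w - 1 - c) = j := by
            rw [hc]; rcases PySem.Int.mod_two_eq q with hpar | hpar <;> simp only [hpar] <;> norm_num
          rw [hcj, if_pos (by omega)]
          simp
        · -- at least one row after num's row
          rw [PySem.List.pyRange_one_append (q + 1) (R - 1) R (by omega) (by omega),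
              List.foldl_append,
              PySem.List.pyRange_one_cons (show R - 1 < R by omega),
              PySem.List.pyRange_one_eq_nil (show R ≤ R - 1 + 1 by omega)]
          rw [foldl_full n w num c _ 1
              (fun i hi b => by
                rw [PySem.List.mem_pyRange_one] at hi
                exact hafter i (by omega) (by omega) b)]
          simp only [List.foldl_cons, List.foldl_nil]
          rw [rowFold_after n w num (R - 1) c (hnotmem (R - 1) (by omega) (by omega)) hc0 hcw,
              aRow_getD_col n w (R - 1) c hw hc0 hcw]
          rw [hBmain]
          have hlen : ((PySem.List.pyRange (q + 1) (R - 1) 1).length : Int) = R - q - 2 := by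
            rw [PySem.List.length_pyRange_one]; omega
          unfold fcell
          have h0 : 0 ≤ (R - 1) * w := mul_nonneg (by omega) (by omega)
          rcases PySem.Int.mod_two_eq (R - 1) with hpar | hpar <;>
            simp only [hpar] <;> norm_num <;> split_ifs <;> omega
      · -- num ≥ 0 but outside the grid : never found, nothing counted
        have hB : solution_alt n w num = 0 := by
          simp only [solution_alt]
          rw [if_pos (by omega)]
        rw [hB, foldl_skip n w num _ 0 ?_]
        intro i hi
        rw [PySem.List.mem_pyRange_one] at hi
        apply aRow_not_mem
        intro j hj0 hjw
        unfold fcell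
        have h1 : 0 ≤ i * w := mul_nonneg hi.1 (by omega)
        split <;> omega

-- ===== VERDICT (by name: the statement is the Claim_ definition above) =====
theorem solution_spec : Claim_equal_solution := by
  intro n w num _ hpre
  exact solution_spec' n w num hpre
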